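-- pv_equiv track=rewrite | github.com/adamkrellenstein/MeterMeter | llm_refiner.py | _split_stress_by_baseline
-- ===== SOURCE A (Python) =====
-- from typing import Callable, Dict, List, Optional
--
-- def _split_stress_by_baseline(stress_pattern: str, baseline_token_patterns) -> List[str]:
--     if not isinstance(baseline_token_patterns, list) or not baseline_token_patterns:
--         return []
--     out: List[str] = []
--     idx = 0
--     for item in baseline_token_patterns:
--         if not isinstance(item, str) or not item:
--             return []
--         width = len(item)
--         if idx + width > len(stress_pattern):
--             return []
--         out.append(stress_pattern[idx : idx + width])
--         idx += width
--     if idx != len(stress_pattern):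
--         return []
--     return out
-- ===== SOURCE B (Python) =====
-- from itertools import accumulate
-- from typing import List
--
-- def _split_stress_by_baseline(stress_pattern: str, baseline_token_patterns) -> List[str]:
--     if not isinstance(baseline_token_patterns, list) or not baseline_token_patterns:
--         return []
--     widths: List[int] = []
--     for item in baseline_token_patterns:
--         if not isinstance(item, str) or not item:
--             return []
--         widths.append(len(item))
--     if sum(widths) != len(stress_pattern):
--         return []
--     bounds = [0] + list(accumulate(widths))
--     return [stress_pattern[a:b] for a, b in zip(bounds, bounds[1:])]
-- ===== Notes on version B (the rewrite author's own statement) =====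
-- stated objective: simpler
-- what changed: Replaced the interleaved single-pass index accumulation with per-step overflow checks by a validate-then-check decomposition: collect all token widths first, reject unless their sum equals len(stress_pattern), then cut the string along accumulated boundary offsets.
import Mathlib
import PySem

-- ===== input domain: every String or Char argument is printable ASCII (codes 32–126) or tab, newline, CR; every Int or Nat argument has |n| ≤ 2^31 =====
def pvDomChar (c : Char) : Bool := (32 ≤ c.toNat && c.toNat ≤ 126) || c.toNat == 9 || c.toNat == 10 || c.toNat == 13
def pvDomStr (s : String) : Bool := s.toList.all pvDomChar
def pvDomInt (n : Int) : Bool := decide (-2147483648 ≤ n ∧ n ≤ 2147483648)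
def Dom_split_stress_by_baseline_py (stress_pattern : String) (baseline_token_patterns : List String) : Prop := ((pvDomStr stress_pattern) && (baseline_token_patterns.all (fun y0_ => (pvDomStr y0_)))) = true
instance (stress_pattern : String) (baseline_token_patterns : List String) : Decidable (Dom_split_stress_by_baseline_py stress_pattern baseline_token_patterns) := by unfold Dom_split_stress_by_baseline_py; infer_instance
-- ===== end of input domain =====

-- B changes A's interleaved single-pass index accumulation (with per-step overflow checks)
-- into a validate-then-check-then-slice decomposition (objective: simpler).

-- ===== PORT A =====
-- the 'for item in baseline_token_patterns' loop of A, with state (idx, out)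
def pvALoop (sp : String) (items : List String) (idx : Int) (out : List String) : List String :=
  match items with
  | [] => if idx ≠ (PySem.Str.len sp : Int) then [] else out
  | item :: rest =>
      if item = "" then []
      else
        let width : Int := (PySem.Str.len item : Int)
        if idx + width > (PySem.Str.len sp : Int) then []
        else pvALoop sp rest (idx + width)
               (out ++ [PySem.Str.slice sp (some idx) (some (idx + width))])

def split_stress_by_baseline_py (stress_pattern : String) (baseline_token_patterns : List String) : List String :=
  if baseline_token_patterns = [] then []
  else pvALoop stress_pattern baseline_token_patterns 0 []

-- ===== PORT B =====
-- B's first loop: the list of widths, or none at the first empty item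
def pvWidths (items : List String) : Option (List Int) :=
  match items with
  | [] => some []
  | item :: rest =>
      if item = "" then none
      else (pvWidths rest).map (fun ws => (PySem.Str.len item : Int) :: ws)

-- itertools.accumulate with explicit running start
def pvAccum (a : Int) (ws : List Int) : List Int :=
  match ws with
  | [] => []
  | w :: rest => (a + w) :: pvAccum (a + w) rest

def split_stress_by_baseline_py_alt (stress_pattern : String) (baseline_token_patterns : List String) : List String :=
  if baseline_token_patterns = [] then []
  else
    match pvWidths baseline_token_patterns with
    | none => []
    | some ws =>
        if ws.sum ≠ (PySem.Str.len stress_pattern : Int) then []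
        else
          let bounds : List Int := 0 :: pvAccum 0 ws
          (bounds.zip bounds.tail).map
            (fun p => PySem.Str.slice stress_pattern (some p.1) (some p.2))

-- ===== PRECONDITION & SPEC =====
def Spec_split_stress_by_baseline_py (stress_pattern : String) (baseline_token_patterns : List String) (out : List String) : Prop := out = split_stress_by_baseline_py_alt stress_pattern baseline_token_patterns
instance (stress_pattern : String) (baseline_token_patterns : List String) (out : List String) : Decidable (Spec_split_stress_by_baseline_py stress_pattern baseline_token_patterns out) := by unfold Spec_split_stress_by_baseline_py; infer_instance

-- ===== CLAIM (what is proved, stated in full; the proofs are below) =====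
def Claim_equal_split_stress_by_baseline_py : Prop := ∀ (stress_pattern : String) (baseline_token_patterns : List String), Dom_split_stress_by_baseline_py stress_pattern baseline_token_patterns → Spec_split_stress_by_baseline_py stress_pattern baseline_token_patterns (split_stress_by_baseline_py stress_pattern baseline_token_patterns)

-- ===== LEMMAS AND PROOFS =====

lemma pvWidths_sum_nonneg (items : List String) (ws : List Int)
    (h : pvWidths items = some ws) : 0 ≤ ws.sum := by
  induction items generalizing ws with
  | nil =>
      simp only [pvWidths, Option.some.injEq] at h
      simp [← h]
  | cons item rest ih =>
      simp only [pvWidths] at h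
      by_cases he : item = ""
      · rw [if_pos he] at h; exact absurd h (by simp)
      · rw [if_neg he] at h
        cases hr : pvWidths rest with
        | none => rw [hr] at h; simp at h
        | some ws' =>
            rw [hr] at h
            simp only [Option.map_some, Option.some.injEq] at h
            have := ih ws' hr
            have hlen : (0:Int) ≤ (PySem.Str.len item : Int) := Int.natCast_nonneg _
            subst h; simp only [List.sum_cons]; omega

-- the loop of A equals B's check-then-slice on the remaining items, for any state
lemma pvALoop_eq (sp : String) (items : List String) (idx : Int) (out : List String) :
    pvALoop sp items idx out =
      match pvWidths items with
      | none => []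
      | some ws =>
          if idx + ws.sum ≠ (PySem.Str.len sp : Int) then []
          else out ++ ((idx :: pvAccum idx ws).zip (pvAccum idx ws)).map
                 (fun p => PySem.Str.slice sp (some p.1) (some p.2)) := by
  induction items generalizing idx out with
  | nil =>
      simp only [pvWidths, pvALoop, pvAccum]
      split_ifs with h1 h2 h2 <;> simp_all
  | cons item rest ih =>
      simp only [pvALoop, pvWidths]
      split_ifs with he hov
      · rfl
      · -- overflow: idx + len item > len sp; RHS must be [] whichever way pvWidths rest goes
        cases hr : pvWidths rest with
        | none => simp
        | some ws' =>
            have hnn := pvWidths_sum_nonneg rest ws' hr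
            simp only [Option.map_some]
            rw [if_pos (by simp only [List.sum_cons]; omega)]
      · rw [ih]
        cases hr : pvWidths rest with
        | none => simp
        | some ws' =>
            simp only [Option.map_some, List.sum_cons, pvAccum, List.zip_cons_cons,
              List.map_cons]
            by_cases hsum : idx + ((PySem.Str.len item : Int) + ws'.sum) = (PySem.Str.len sp : Int)
            · rw [if_neg (by omega), if_neg (by omega)]
              simp [List.append_assoc]
            · rw [if_pos (by omega), if_pos (by omega)]

-- ===== VERDICT (by name: the statement is the Claim_ definition above) =====
theorem split_stress_by_baseline_py_spec : Claim_equal_split_stress_by_baseline_py := by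
  intro sp ts _
  unfold Spec_split_stress_by_baseline_py split_stress_by_baseline_py split_stress_by_baseline_py_alt
  by_cases hts : ts = []
  · simp [hts]
  · rw [if_neg hts, if_neg hts, pvALoop_eq]
    cases hw : pvWidths ts with
    | none => rfl
    | some ws => simp only [List.tail_cons, zero_add, List.nil_append]
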